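-- pv_equiv track=rewrite | github.com/fandreuz/matrix-rotation | rotation.py | computeOldPosition
-- ===== SOURCE A (Python) =====
-- def computeRing(rows_count: int, cols_count: int, row: int, col: int) -> int:
--     return min(row, col, rows_count - 1 - row, cols_count - 1 - col)
--
-- def computeRingSize(rows_count: int, cols_count: int, ring: int) -> int:
--     return (rows_count - 2 * ring) * 2 + (cols_count - 2 * ring - 2) * 2
--
-- def goLeft(rotation: int, col: int, ring: int) -> tuple[int, int]:
--     shift = min(rotation, col - ring)
--     col -= shift
--     rotation -= shift
--     return col, rotation
--
-- def goRight(rotation: int, col: int, cols_count: int, ring: int) -> tuple[int, int]: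
--     shift = min(rotation, cols_count - 1 - ring - col)
--     col += shift
--     rotation -= shift
--     return col, rotation
--
-- def goUp(rotation: int, row: int, ring: int) -> tuple[int, int]:
--     shift = min(rotation, row - ring)
--     row -= shift
--     rotation -= shift
--     return row, rotation
--
-- def goDown(rotation: int, row: int, rows_count: int, ring: int) -> tuple[int, int]:
--     shift = min(rotation, rows_count - 1 - ring - row)
--     row += shift
--     rotation -= shift
--     return row, rotation
--
-- def computeOldPosition(
--     rows_count: int, cols_count: int, rotation: int, row: int, col: int
-- ) -> tuple[int, int]:
--     ring = computeRing(rows_count, cols_count, row, col)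
--     ring_size = computeRingSize(rows_count, cols_count, ring)
--     rotation = rotation % ring_size
--     while rotation > 0:
--         if row == ring:
--             if col == cols_count - 1 - ring:
--                 row, rotation = goDown(
--                     rotation=rotation, row=row, rows_count=rows_count, ring=ring
--                 )
--             else:
--                 col, rotation = goRight(
--                     rotation=rotation, col=col, cols_count=cols_count, ring=ring
--                 )
--         elif row == rows_count - 1 - ring:
--             if col == ring:
--                 row, rotation = goUp(rotation=rotation, row=row, ring=ring)
--             else:
--                 col, rotation = goLeft(rotation=rotation, col=col, ring=ring)
--         elif col == ring:
--             row, rotation = goUp(rotation=rotation, row=row, ring=ring)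
--         elif col == cols_count - 1 - ring:
--             row, rotation = goDown(
--                 rotation=rotation, row=row, rows_count=rows_count, ring=ring
--             )
--         else:
--             raise ValueError(f"Unexpected coords for {ring=}: {row=}, {col=}")
--
--     assert rotation == 0, rotation
--     return row, col
-- ===== SOURCE B (Python) =====
-- def _perimeter_index(rows_count, cols_count, ring, row, col):
--     w = cols_count - 2 * ring
--     h = rows_count - 2 * ring
--     if row == ring:
--         return col - ring
--     if row == rows_count - 1 - ring:
--         if col == ring:
--             return (w - 1) + (h - 1) + (w - 1)
--         return (w - 1) + (h - 1) + (cols_count - 1 - ring - col)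
--     if col == ring:
--         return 2 * (w - 1) + (h - 1) + (rows_count - 1 - ring - row)
--     return (w - 1) + (row - ring)
--
--
-- def _perimeter_cell(rows_count, cols_count, ring, j):
--     w = cols_count - 2 * ring
--     h = rows_count - 2 * ring
--     if j <= w - 1:
--         return ring, ring + j
--     if j <= (w - 1) + (h - 1):
--         return ring + (j - (w - 1)), cols_count - 1 - ring
--     if j <= 2 * (w - 1) + (h - 1):
--         return rows_count - 1 - ring, cols_count - 1 - ring - (j - (w - 1) - (h - 1))
--     return rows_count - 1 - ring - (j - 2 * (w - 1) - (h - 1)), ring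
--
--
-- def computeOldPosition(rows_count, cols_count, rotation, row, col):
--     ring = min(row, col, rows_count - 1 - row, cols_count - 1 - col)
--     ring_size = 2 * (cols_count - 2 * ring - 1) + 2 * (rows_count - 2 * ring - 1)
--     rotation %= ring_size
--     i = _perimeter_index(rows_count, cols_count, ring, row, col)
--     j = (i + rotation) % ring_size
--     return _perimeter_cell(rows_count, cols_count, ring, j)
-- ===== Notes on version B (the rewrite author's own statement) =====
-- stated objective: alternative
-- what changed: Replaces A's iterative corner-to-corner walk around the ring with a closed-form computation: linearize (row, col) to a clockwise perimeter index, add the rotation modulo the ring size, and map the index back to coordinates.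
import Mathlib
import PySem

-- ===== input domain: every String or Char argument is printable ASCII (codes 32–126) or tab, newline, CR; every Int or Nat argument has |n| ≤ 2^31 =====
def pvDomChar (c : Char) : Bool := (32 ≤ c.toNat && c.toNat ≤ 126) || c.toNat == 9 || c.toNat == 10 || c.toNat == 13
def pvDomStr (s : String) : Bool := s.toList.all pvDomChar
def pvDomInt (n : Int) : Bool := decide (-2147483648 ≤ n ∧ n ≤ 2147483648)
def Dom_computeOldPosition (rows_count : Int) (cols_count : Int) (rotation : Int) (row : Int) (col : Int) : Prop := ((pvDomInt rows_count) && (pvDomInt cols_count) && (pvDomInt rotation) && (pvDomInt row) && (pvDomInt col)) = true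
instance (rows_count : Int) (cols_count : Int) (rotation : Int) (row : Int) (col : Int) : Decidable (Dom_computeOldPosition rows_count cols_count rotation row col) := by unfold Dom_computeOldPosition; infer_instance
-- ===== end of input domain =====

-- B replaces A's step-by-step perimeter walk by a closed-form perimeter linearization:
-- index the cell on its ring, add the rotation modulo the ring size, map the index back.

-- ===== PORT A =====
def computeRing (rows_count : Int) (cols_count : Int) (row : Int) (col : Int) : Int :=
  min (min (min row col) (rows_count - 1 - row)) (cols_count - 1 - col)

def computeRingSize (rows_count : Int) (cols_count : Int) (ring : Int) : Int :=
  (rows_count - 2 * ring) * 2 + (cols_count - 2 * ring - 2) * 2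

def goLeft (rotation : Int) (col : Int) (ring : Int) : Int × Int :=
  let shift := min rotation (col - ring)
  (col - shift, rotation - shift)

def goRight (rotation : Int) (col : Int) (cols_count : Int) (ring : Int) : Int × Int :=
  let shift := min rotation (cols_count - 1 - ring - col)
  (col + shift, rotation - shift)

def goUp (rotation : Int) (row : Int) (ring : Int) : Int × Int :=
  let shift := min rotation (row - ring)
  (row - shift, rotation - shift)

def goDown (rotation : Int) (row : Int) (rows_count : Int) (ring : Int) : Int × Int :=
  let shift := min rotation (rows_count - 1 - ring - row)
  (row + shift, rotation - shift)

-- A's while-loop; fuel-based (the Python loop can diverge outside Pre_; inside Pre_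
-- rotation strictly decreases each iteration, so fuel = rotation.toNat suffices).
-- The final else arm is Python's `raise ValueError` (unreachable on perimeter cells).
def copLoop (rows_count : Int) (cols_count : Int) (ring : Int) :
    Nat → Int → Int → Int → Int × Int
  | 0, _, row, col => (row, col)
  | fuel + 1, rotation, row, col =>
    if rotation > 0 then
      if row = ring then
        if col = cols_count - 1 - ring then
          let p := goDown rotation row rows_count ring
          copLoop rows_count cols_count ring fuel p.2 p.1 col
        else
          let p := goRight rotation col cols_count ring
          copLoop rows_count cols_count ring fuel p.2 row p.1
      else if row = rows_count - 1 - ring then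
        if col = ring then
          let p := goUp rotation row ring
          copLoop rows_count cols_count ring fuel p.2 p.1 col
        else
          let p := goLeft rotation col ring
          copLoop rows_count cols_count ring fuel p.2 row p.1
      else if col = ring then
        let p := goUp rotation row ring
        copLoop rows_count cols_count ring fuel p.2 p.1 col
      else if col = cols_count - 1 - ring then
        let p := goDown rotation row rows_count ring
        copLoop rows_count cols_count ring fuel p.2 p.1 col
      else (row, col)
    else (row, col)

def computeOldPosition (rows_count : Int) (cols_count : Int) (rotation : Int) (row : Int) (col : Int) : Int × Int :=
  let ring := computeRing rows_count cols_count row col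
  let ring_size := computeRingSize rows_count cols_count ring
  let rot := PySem.Int.mod rotation ring_size
  copLoop rows_count cols_count ring rot.toNat rot row col

-- ===== PORT B =====
def perimeterIndex (rows_count : Int) (cols_count : Int) (ring : Int) (row : Int) (col : Int) : Int :=
  let w := cols_count - 2 * ring
  let h := rows_count - 2 * ring
  if row = ring then col - ring
  else if row = rows_count - 1 - ring then
    if col = ring then (w - 1) + (h - 1) + (w - 1)
    else (w - 1) + (h - 1) + (cols_count - 1 - ring - col)
  else if col = ring then 2 * (w - 1) + (h - 1) + (rows_count - 1 - ring - row)
  else (w - 1) + (row - ring)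

def perimeterCell (rows_count : Int) (cols_count : Int) (ring : Int) (j : Int) : Int × Int :=
  let w := cols_count - 2 * ring
  let h := rows_count - 2 * ring
  if j ≤ w - 1 then (ring, ring + j)
  else if j ≤ (w - 1) + (h - 1) then (ring + (j - (w - 1)), cols_count - 1 - ring)
  else if j ≤ 2 * (w - 1) + (h - 1) then
    (rows_count - 1 - ring, cols_count - 1 - ring - (j - (w - 1) - (h - 1)))
  else (rows_count - 1 - ring - (j - 2 * (w - 1) - (h - 1)), ring)

def computeOldPosition_alt (rows_count : Int) (cols_count : Int) (rotation : Int) (row : Int) (col : Int) : Int × Int :=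
  let ring := min (min (min row col) (rows_count - 1 - row)) (cols_count - 1 - col)
  let ring_size := 2 * (cols_count - 2 * ring - 1) + 2 * (rows_count - 2 * ring - 1)
  let rot := PySem.Int.mod rotation ring_size
  let i := perimeterIndex rows_count cols_count ring row col
  let j := PySem.Int.mod (i + rot) ring_size
  perimeterCell rows_count cols_count ring j

-- ===== PRECONDITION & SPEC =====
-- Pre_ excludes exactly the inputs where A does not return: ring_size = 0 (the single-cell
-- ring; `rotation % ring_size` raises ZeroDivisionError in both A and B), and the degenerate
-- height-1 ring when the rotation pushes past its right corner, where A's walk loops forever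
-- (goDown with shift 0).
def Pre_computeOldPosition (rows_count : Int) (cols_count : Int) (rotation : Int) (row : Int) (col : Int) : Prop :=
  let ring := min (min (min row col) (rows_count - 1 - row)) (cols_count - 1 - col)
  let ring_size := 2 * (cols_count - 2 * ring - 1) + 2 * (rows_count - 2 * ring - 1)
  0 < ring_size ∧
    (rows_count - 2 * ring = 1 → rotation % ring_size ≤ cols_count - 1 - ring - col)

instance (rows_count : Int) (cols_count : Int) (rotation : Int) (row : Int) (col : Int) : Decidable (Pre_computeOldPosition rows_count cols_count rotation row col) := by unfold Pre_computeOldPosition; infer_instance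

def pvWitness_computeOldPosition : Int × Int × Int × Int × Int := (4, 5, 3, 0, 2)

def Spec_computeOldPosition (rows_count : Int) (cols_count : Int) (rotation : Int) (row : Int) (col : Int) (out : Int × Int) : Prop := out = computeOldPosition_alt rows_count cols_count rotation row col
instance (rows_count : Int) (cols_count : Int) (rotation : Int) (row : Int) (col : Int) (out : Int × Int) : Decidable (Spec_computeOldPosition rows_count cols_count rotation row col out) := by unfold Spec_computeOldPosition; infer_instance

-- ===== CLAIM (what is proved, stated in full; the proofs are below) =====
def Claim_equal_computeOldPosition : Prop := ∀ (rows_count : Int) (cols_count : Int) (rotation : Int) (row : Int) (col : Int), Dom_computeOldPosition rows_count cols_count rotation row col → Pre_computeOldPosition rows_count cols_count rotation row col → Spec_computeOldPosition rows_count cols_count rotation row col (computeOldPosition rows_count cols_count rotation row col)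

-- ===== LEMMAS AND PROOFS =====

-- reduce a % rs for 0 ≤ a < 2*rs to a linear two-case form
lemma emod_two_cases (rs a : Int) (hpos : 0 < rs) (ha : 0 ≤ a) (ha2 : a < 2 * rs) :
    a % rs = if a < rs then a else a - rs := by
  split_ifs with h
  · exact Int.emod_eq_of_lt ha h
  · have h2 : (a - rs) % rs = a % rs := by
      conv_rhs => rw [show a = a - rs + rs * 1 by ring]
      rw [Int.add_mul_emod_self_left]
    rw [← h2, Int.emod_eq_of_lt (by omega) (by omega)]

-- the perimeter index of a cell lying on its ring is in [0, ring_size)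
lemma perimeterIndex_range (rows cols ring rs row col : Int)
    (hrs : rs = 2 * (cols - 2 * ring - 1) + 2 * (rows - 2 * ring - 1))
    (hpos : 0 < rs)
    (h1 : ring ≤ row) (h2 : row ≤ rows - 1 - ring)
    (h3 : ring ≤ col) (h4 : col ≤ cols - 1 - ring)
    (hOn : row = ring ∨ row = rows - 1 - ring ∨ col = ring ∨ col = cols - 1 - ring) :
    0 ≤ perimeterIndex rows cols ring row col ∧ perimeterIndex rows cols ring row col < rs := by
  simp only [perimeterIndex]
  split_ifs <;> omega

-- mapping the index back recovers the cell
lemma perimeterCell_index (rows cols ring rs row col : Int)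
    (hrs : rs = 2 * (cols - 2 * ring - 1) + 2 * (rows - 2 * ring - 1))
    (hpos : 0 < rs)
    (h1 : ring ≤ row) (h2 : row ≤ rows - 1 - ring)
    (h3 : ring ≤ col) (h4 : col ≤ cols - 1 - ring)
    (hOn : row = ring ∨ row = rows - 1 - ring ∨ col = ring ∨ col = cols - 1 - ring) :
    perimeterCell rows cols ring (perimeterIndex rows cols ring row col) = (row, col) := by
  simp only [perimeterIndex, perimeterCell]
  split_ifs <;> simp only [Prod.mk.injEq] <;> omega

-- perimeterCell is invariant under the index identifications of degenerate (thin) rings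
set_option maxHeartbeats 2000000 in
lemma cell_congr (rows cols ring rs a b : Int)
    (hrs : rs = 2 * (cols - 2 * ring - 1) + 2 * (rows - 2 * ring - 1))
    (hpos : 0 < rs)
    (ha : 0 ≤ a) (hb : 0 ≤ b) (ha2 : a < 2 * rs) (hb2 : b < 2 * rs)
    (hab : a = b ∨ a + rs = b ∨ b + rs = a ∨
      ((cols - 2 * ring = 1 ∨ rows - 2 * ring = 1) ∧ a + b = rs)) :
    perimeterCell rows cols ring (a % rs) = perimeterCell rows cols ring (b % rs) := by
  have ea : (a < rs ∧ a % rs = a) ∨ (rs ≤ a ∧ a % rs = a - rs) := by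
    rcases lt_or_ge a rs with h | h
    · exact Or.inl ⟨h, Int.emod_eq_of_lt ha h⟩
    · refine Or.inr ⟨h, ?_⟩
      rw [emod_two_cases rs a hpos ha ha2, if_neg (by omega)]
  have eb : (b < rs ∧ b % rs = b) ∨ (rs ≤ b ∧ b % rs = b - rs) := by
    rcases lt_or_ge b rs with h | h
    · exact Or.inl ⟨h, Int.emod_eq_of_lt hb h⟩
    · refine Or.inr ⟨h, ?_⟩
      rw [emod_two_cases rs b hpos hb hb2, if_neg (by omega)]
  rcases ea with ⟨hA, eA⟩ | ⟨hA, eA⟩ <;> rcases eb with ⟨hB, eB⟩ | ⟨hB, eB⟩ <;>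
    rw [eA, eB] <;> simp only [perimeterCell] <;> split_ifs <;>
    simp only [Prod.mk.injEq, and_true, true_and] <;> first | trivial | omega

-- loop invariant: the walk preserves the cell addressed by
-- (perimeter index + remaining rotation) mod ring_size
set_option maxHeartbeats 2000000 in
lemma copLoop_eq_cell (rows cols ring rs : Int)
    (hrs : rs = 2 * (cols - 2 * ring - 1) + 2 * (rows - 2 * ring - 1))
    (hpos : 0 < rs) :
    ∀ (n : Nat) (rot row col : Int),
      rot.toNat ≤ n → 0 ≤ rot → rot < rs →
      ring ≤ row → row ≤ rows - 1 - ring → ring ≤ col → col ≤ cols - 1 - ring →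
      (row = ring ∨ row = rows - 1 - ring ∨ col = ring ∨ col = cols - 1 - ring) →
      (rows - 2 * ring = 1 → rot ≤ cols - 1 - ring - col) →
      copLoop rows cols ring n rot row col
        = perimeterCell rows cols ring ((perimeterIndex rows cols ring row col + rot) % rs) := by
  intro n
  induction n with
  | zero =>
    intro rot row col hfuel hrot hrotlt h1 h2 h3 h4 hOn hthin
    have hrot0 : rot = 0 := by omega
    subst hrot0
    have hR := perimeterIndex_range rows cols ring rs row col hrs hpos h1 h2 h3 h4 hOn
    rw [show perimeterIndex rows cols ring row col + 0 = perimeterIndex rows cols ring row col by ring,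
        Int.emod_eq_of_lt hR.1 hR.2]
    exact (perimeterCell_index rows cols ring rs row col hrs hpos h1 h2 h3 h4 hOn).symm
  | succ n ih =>
    intro rot row col hfuel hrot hrotlt h1 h2 h3 h4 hOn hthin
    by_cases hgt : rot > 0
    · have hthin' : rows - 2 * ring ≠ 1 ∨ rot ≤ cols - 1 - ring - col := by
        by_cases hh : rows - 2 * ring = 1
        · exact Or.inr (hthin hh)
        · exact Or.inl hh
      have hIdx := perimeterIndex_range rows cols ring rs row col hrs hpos h1 h2 h3 h4 hOn
      simp only [copLoop, if_pos hgt, goDown, goRight, goUp, goLeft]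
      split_ifs with b1 b2 b3 b4 b5 b6
      · -- top-right corner: goDown
        rw [cell_congr rows cols ring rs
            (perimeterIndex rows cols ring row col + rot)
            (perimeterIndex rows cols ring (row + min rot (rows - 1 - ring - row)) col
              + (rot - min rot (rows - 1 - ring - row))) hrs hpos
            (by omega) (by simp only [perimeterIndex, min_def]; split_ifs <;> omega)
            (by omega) (by simp only [perimeterIndex, min_def]; split_ifs <;> omega)
            (by simp only [perimeterIndex, min_def]; split_ifs <;> omega)]
        exact ih _ _ _ (by omega) (by omega) (by omega) (by omega) (by omega) (by omega)
          (by omega) (by omega) (by omega)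
      · -- top row: goRight
        rw [cell_congr rows cols ring rs
            (perimeterIndex rows cols ring row col + rot)
            (perimeterIndex rows cols ring row (col + min rot (cols - 1 - ring - col))
              + (rot - min rot (cols - 1 - ring - col))) hrs hpos
            (by omega) (by simp only [perimeterIndex, min_def]; split_ifs <;> omega)
            (by omega) (by simp only [perimeterIndex, min_def]; split_ifs <;> omega)
            (by simp only [perimeterIndex, min_def]; split_ifs <;> omega)]
        exact ih _ _ _ (by omega) (by omega) (by omega) (by omega) (by omega) (by omega)
          (by omega) (by omega) (by omega)
      · -- bottom-left corner: goUp
        rw [cell_congr rows cols ring rs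
            (perimeterIndex rows cols ring row col + rot)
            (perimeterIndex rows cols ring (row - min rot (row - ring)) col
              + (rot - min rot (row - ring))) hrs hpos
            (by omega) (by simp only [perimeterIndex, min_def]; split_ifs <;> omega)
            (by omega) (by simp only [perimeterIndex, min_def]; split_ifs <;> omega)
            (by simp only [perimeterIndex, min_def]; split_ifs <;> omega)]
        exact ih _ _ _ (by omega) (by omega) (by omega) (by omega) (by omega) (by omega)
          (by omega) (by omega) (by omega)
      · -- bottom row: goLeft
        rw [cell_congr rows cols ring rs
            (perimeterIndex rows cols ring row col + rot)
            (perimeterIndex rows cols ring row (col - min rot (col - ring))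
              + (rot - min rot (col - ring))) hrs hpos
            (by omega) (by simp only [perimeterIndex, min_def]; split_ifs <;> omega)
            (by omega) (by simp only [perimeterIndex, min_def]; split_ifs <;> omega)
            (by simp only [perimeterIndex, min_def]; split_ifs <;> omega)]
        exact ih _ _ _ (by omega) (by omega) (by omega) (by omega) (by omega) (by omega)
          (by omega) (by omega) (by omega)
      · -- left column: goUp
        rw [cell_congr rows cols ring rs
            (perimeterIndex rows cols ring row col + rot)
            (perimeterIndex rows cols ring (row - min rot (row - ring)) col
              + (rot - min rot (row - ring))) hrs hpos
            (by omega) (by simp only [perimeterIndex, min_def]; split_ifs <;> omega)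
            (by omega) (by simp only [perimeterIndex, min_def]; split_ifs <;> omega)
            (by simp only [perimeterIndex, min_def]; split_ifs <;> omega)]
        exact ih _ _ _ (by omega) (by omega) (by omega) (by omega) (by omega) (by omega)
          (by omega) (by omega) (by omega)
      · -- right column: goDown
        rw [cell_congr rows cols ring rs
            (perimeterIndex rows cols ring row col + rot)
            (perimeterIndex rows cols ring (row + min rot (rows - 1 - ring - row)) col
              + (rot - min rot (rows - 1 - ring - row))) hrs hpos
            (by omega) (by simp only [perimeterIndex, min_def]; split_ifs <;> omega)
            (by omega) (by simp only [perimeterIndex, min_def]; split_ifs <;> omega)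
            (by simp only [perimeterIndex, min_def]; split_ifs <;> omega)]
        exact ih _ _ _ (by omega) (by omega) (by omega) (by omega) (by omega) (by omega)
          (by omega) (by omega) (by omega)
      · -- ValueError arm: unreachable on perimeter cells
        exfalso; omega
    · have hrot0 : rot = 0 := by omega
      subst hrot0
      have hR := perimeterIndex_range rows cols ring rs row col hrs hpos h1 h2 h3 h4 hOn
      rw [show perimeterIndex rows cols ring row col + 0 = perimeterIndex rows cols ring row col by ring,
          Int.emod_eq_of_lt hR.1 hR.2]
      simp only [copLoop, if_neg hgt]
      exact (perimeterCell_index rows cols ring rs row col hrs hpos h1 h2 h3 h4 hOn).symm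

-- ===== VERDICT (by name: the statement is the Claim_ definition above) =====
theorem computeOldPosition_spec : Claim_equal_computeOldPosition := by
  intro rows cols rotation row col _ hPre
  have hpos : 0 < 2 * (cols - 2 * (min (min (min row col) (rows - 1 - row)) (cols - 1 - col)) - 1)
      + 2 * (rows - 2 * (min (min (min row col) (rows - 1 - row)) (cols - 1 - col)) - 1) := hPre.1
  have hthin := hPre.2
  set ring := min (min (min row col) (rows - 1 - row)) (cols - 1 - col) with hring
  set rsB := 2 * (cols - 2 * ring - 1) + 2 * (rows - 2 * ring - 1) with hrsB
  show computeOldPosition rows cols rotation row col = computeOldPosition_alt rows cols rotation row col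
  have keyA : computeOldPosition rows cols rotation row col
      = copLoop rows cols ring (PySem.Int.mod rotation (computeRingSize rows cols ring)).toNat
          (PySem.Int.mod rotation (computeRingSize rows cols ring)) row col := rfl
  have keyB : computeOldPosition_alt rows cols rotation row col
      = perimeterCell rows cols ring
          (PySem.Int.mod (perimeterIndex rows cols ring row col + PySem.Int.mod rotation rsB) rsB) := rfl
  have hrsA : computeRingSize rows cols ring = rsB := by
    unfold computeRingSize; rw [hrsB]; ring
  rw [keyA, keyB, hrsA, PySem.Int.mod_eq_emod_of_pos hpos, PySem.Int.mod_eq_emod_of_pos hpos]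
  have hrow1 : ring ≤ row := by omega
  have hrow2 : row ≤ rows - 1 - ring := by omega
  have hcol1 : ring ≤ col := by omega
  have hcol2 : col ≤ cols - 1 - ring := by omega
  have hOn : row = ring ∨ row = rows - 1 - ring ∨ col = ring ∨ col = cols - 1 - ring := by omega
  exact copLoop_eq_cell rows cols ring rsB rfl hpos _ _ _ _ (le_refl _)
    (Int.emod_nonneg _ (by omega)) (Int.emod_lt_of_pos _ hpos) hrow1 hrow2 hcol1 hcol2 hOn
    (fun hh => hthin hh)
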